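-- pv_equiv track=rewrite | github.com/BinGiTexh/digital-biography-platform | agents/specialized/github_agent.py | analyze_repo_for_content
-- ===== SOURCE A (Python) =====
-- def analyze_repo_for_content(repo):
--     """Analyze repository to determine content themes and generate posts"""
--     name = repo.get('name', '')
--     description = repo.get('description', '')
--     language = repo.get('language', '')
--     topics = repo.get('topics', [])
--
--     # Determine content themes based on repository
--     content_themes = []
--
--     if any(keyword in name.lower() or keyword in description.lower()
--            for keyword in ['job', 'career', 'work']):
--         content_themes.append('jamaican_job_innovation')
--
--     elif any(keyword in name.lower() or keyword in description.lower()
--              for keyword in ['soccer', 'football', 'sport']):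
--         content_themes.append('soccer_tech_fusion')
--
--     elif any(keyword in name.lower() or keyword in description.lower()
--              for keyword in ['api', 'backend', 'service']):
--         content_themes.append('backend_architecture')
--
--     elif any(keyword in name.lower() or keyword in description.lower()
--              for keyword in ['ai', 'ml', 'machine learning']):
--         content_themes.append('ai_innovation')
--
--     else:
--         content_themes.append('general_tech_innovation')
--
--     return content_themes
-- ===== SOURCE B (Python) =====
-- # B: flatten keywords into (keyword, priority) pairs, collect ALL matching priorities
-- # in one comprehension, then select the best theme with min() (alternative decomposition:
-- # all-matches + min-select instead of A's short-circuiting elif chain).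
-- _PAIRS = [('job', 0), ('career', 0), ('work', 0),
--           ('soccer', 1), ('football', 1), ('sport', 1),
--           ('api', 2), ('backend', 2), ('service', 2),
--           ('ai', 3), ('ml', 3), ('machine learning', 3)]
-- _THEMES = ['jamaican_job_innovation', 'soccer_tech_fusion',
--            'backend_architecture', 'ai_innovation', 'general_tech_innovation']
--
-- def analyze_repo_for_content(repo):
--     n = repo.get('name', '').lower()
--     d = repo.get('description', '').lower()
--     hits = [i for kw, i in _PAIRS if kw in n or kw in d]
--     return [_THEMES[min(hits)]] if hits else [_THEMES[4]]
-- ===== Notes on version B (the rewrite author's own statement) =====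
-- stated objective: alternative
-- what changed: Replaced A's four short-circuiting elif branches by a flattened (keyword, priority) table: one comprehension collects the priorities of ALL matching keywords, and min() then selects the highest-priority theme (all-matches + min-select instead of first-match branching).
import Mathlib
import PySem

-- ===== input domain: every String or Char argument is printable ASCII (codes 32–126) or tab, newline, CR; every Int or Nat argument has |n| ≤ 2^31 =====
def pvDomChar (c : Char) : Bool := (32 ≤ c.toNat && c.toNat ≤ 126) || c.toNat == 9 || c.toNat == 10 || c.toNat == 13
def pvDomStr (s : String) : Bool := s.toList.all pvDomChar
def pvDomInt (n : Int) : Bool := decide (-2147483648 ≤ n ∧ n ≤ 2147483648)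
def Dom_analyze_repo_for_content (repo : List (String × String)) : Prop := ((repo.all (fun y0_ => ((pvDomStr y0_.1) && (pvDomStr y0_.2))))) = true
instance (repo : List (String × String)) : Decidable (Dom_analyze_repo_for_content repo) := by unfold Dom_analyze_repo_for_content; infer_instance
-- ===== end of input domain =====

-- B flattens the keywords into (keyword, priority) pairs, collects the priorities of ALL
-- matching keywords and selects the theme with min; same values as A's elif chain (no speed claim).
-- ===== PORT A =====
def analyze_repo_for_content (repo : List (String × String)) : List String :=
  let name := (PySem.Dict.mk repo).getD "name" ""
  let description := (PySem.Dict.mk repo).getD "description" ""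
  let _language := (PySem.Dict.mk repo).getD "language" ""
  -- repo.get('topics', []) is unused by A; in the str→str dict it is a string or [], never read
  let content_themes : List String := []
  if ["job", "career", "work"].any (fun kw =>
      PySem.Str.isIn kw (PySem.Str.lower name) || PySem.Str.isIn kw (PySem.Str.lower description)) then
    content_themes ++ ["jamaican_job_innovation"]
  else if ["soccer", "football", "sport"].any (fun kw =>
      PySem.Str.isIn kw (PySem.Str.lower name) || PySem.Str.isIn kw (PySem.Str.lower description)) then
    content_themes ++ ["soccer_tech_fusion"]
  else if ["api", "backend", "service"].any (fun kw =>
      PySem.Str.isIn kw (PySem.Str.lower name) || PySem.Str.isIn kw (PySem.Str.lower description)) then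
    content_themes ++ ["backend_architecture"]
  else if ["ai", "ml", "machine learning"].any (fun kw =>
      PySem.Str.isIn kw (PySem.Str.lower name) || PySem.Str.isIn kw (PySem.Str.lower description)) then
    content_themes ++ ["ai_innovation"]
  else
    content_themes ++ ["general_tech_innovation"]

-- ===== PORT B =====
def pvPairs : List (String × Int) :=
  [("job", 0), ("career", 0), ("work", 0),
   ("soccer", 1), ("football", 1), ("sport", 1),
   ("api", 2), ("backend", 2), ("service", 2),
   ("ai", 3), ("ml", 3), ("machine learning", 3)]

def pvThemes : List String :=
  ["jamaican_job_innovation", "soccer_tech_fusion",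
   "backend_architecture", "ai_innovation", "general_tech_innovation"]

def analyze_repo_for_content_alt (repo : List (String × String)) : List String :=
  let n := PySem.Str.lower ((PySem.Dict.mk repo).getD "name" "")
  let d := PySem.Str.lower ((PySem.Dict.mk repo).getD "description" "")
  let hits : List Int :=
    (pvPairs.filter (fun p => PySem.Str.isIn p.1 n || PySem.Str.isIn p.1 d)).map (·.2)
  match PySem.List.min? hits (fun x => x) with
  | some i => (PySem.List.pyGet? pvThemes i).elim [] (fun t => [t])   -- index always 0..3; IndexError branch unreachable
  | none   => (PySem.List.pyGet? pvThemes 4).elim [] (fun t => [t])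

-- ===== PRECONDITION & SPEC =====
def Spec_analyze_repo_for_content (repo : List (String × String)) (out : List String) : Prop := out = analyze_repo_for_content_alt repo
instance (repo : List (String × String)) (out : List String) : Decidable (Spec_analyze_repo_for_content repo out) := by unfold Spec_analyze_repo_for_content; infer_instance

-- ===== CLAIM (what is proved, stated in full; the proofs are below) =====
def Claim_equal_analyze_repo_for_content : Prop := ∀ (repo : List (String × String)), Dom_analyze_repo_for_content repo → Spec_analyze_repo_for_content repo (analyze_repo_for_content repo)

-- ===== LEMMAS AND PROOFS =====
-- Both sides are reduced to the same 12 per-keyword membership booleans, which are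
-- generalized away; the remaining closed statement over Bool^12 is checked by decide.

-- ===== VERDICT (by name: the statement is the Claim_ definition above) =====
set_option maxHeartbeats 4000000 in
theorem analyze_repo_for_content_spec : Claim_equal_analyze_repo_for_content := by
  intro repo _
  unfold Spec_analyze_repo_for_content analyze_repo_for_content analyze_repo_for_content_alt
  simp only [pvPairs, List.filter_cons, List.filter_nil,
    List.any_cons, List.any_nil, Bool.or_false, List.nil_append]
  generalize (PySem.Str.isIn "job" (PySem.Str.lower ((PySem.Dict.mk repo).getD "name" "")) || PySem.Str.isIn "job" (PySem.Str.lower ((PySem.Dict.mk repo).getD "description" ""))) = b1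
  generalize (PySem.Str.isIn "career" (PySem.Str.lower ((PySem.Dict.mk repo).getD "name" "")) || PySem.Str.isIn "career" (PySem.Str.lower ((PySem.Dict.mk repo).getD "description" ""))) = b2
  generalize (PySem.Str.isIn "work" (PySem.Str.lower ((PySem.Dict.mk repo).getD "name" "")) || PySem.Str.isIn "work" (PySem.Str.lower ((PySem.Dict.mk repo).getD "description" ""))) = b3
  generalize (PySem.Str.isIn "soccer" (PySem.Str.lower ((PySem.Dict.mk repo).getD "name" "")) || PySem.Str.isIn "soccer" (PySem.Str.lower ((PySem.Dict.mk repo).getD "description" ""))) = b4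
  generalize (PySem.Str.isIn "football" (PySem.Str.lower ((PySem.Dict.mk repo).getD "name" "")) || PySem.Str.isIn "football" (PySem.Str.lower ((PySem.Dict.mk repo).getD "description" ""))) = b5
  generalize (PySem.Str.isIn "sport" (PySem.Str.lower ((PySem.Dict.mk repo).getD "name" "")) || PySem.Str.isIn "sport" (PySem.Str.lower ((PySem.Dict.mk repo).getD "description" ""))) = b6
  generalize (PySem.Str.isIn "api" (PySem.Str.lower ((PySem.Dict.mk repo).getD "name" "")) || PySem.Str.isIn "api" (PySem.Str.lower ((PySem.Dict.mk repo).getD "description" ""))) = b7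
  generalize (PySem.Str.isIn "backend" (PySem.Str.lower ((PySem.Dict.mk repo).getD "name" "")) || PySem.Str.isIn "backend" (PySem.Str.lower ((PySem.Dict.mk repo).getD "description" ""))) = b8
  generalize (PySem.Str.isIn "service" (PySem.Str.lower ((PySem.Dict.mk repo).getD "name" "")) || PySem.Str.isIn "service" (PySem.Str.lower ((PySem.Dict.mk repo).getD "description" ""))) = b9
  generalize (PySem.Str.isIn "ai" (PySem.Str.lower ((PySem.Dict.mk repo).getD "name" "")) || PySem.Str.isIn "ai" (PySem.Str.lower ((PySem.Dict.mk repo).getD "description" ""))) = b10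
  generalize (PySem.Str.isIn "ml" (PySem.Str.lower ((PySem.Dict.mk repo).getD "name" "")) || PySem.Str.isIn "ml" (PySem.Str.lower ((PySem.Dict.mk repo).getD "description" ""))) = b11
  generalize (PySem.Str.isIn "machine learning" (PySem.Str.lower ((PySem.Dict.mk repo).getD "name" "")) || PySem.Str.isIn "machine learning" (PySem.Str.lower ((PySem.Dict.mk repo).getD "description" ""))) = b12
  revert b1 b2 b3 b4 b5 b6 b7 b8 b9 b10 b11 b12
  decide
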